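-- pv_equiv track=rewrite | github.com/AsherLHJ/Cursor_Opus_4_5_251125_1640_200k | DB_tools/tools_refresh_db_paper.py | _split_authors
-- ===== SOURCE A (Python) =====
-- def _split_authors(author_field: str) -> str:
--     """
--     将 author 字段标准化为以逗号+空格分隔的作者列表。
--     BibTeX 通常以 ' and ' 分隔作者。
--     """
--     if not author_field:
--         return ""
--
--     # 简单的字符串分割，避免使用正则
--     parts = []
--     current_part = ""
--     i = 0
--     while i < len(author_field):
--         if i <= len(author_field) - 5 and author_field[i:i+5].lower() == ' and ':
--             if current_part.strip():
--                 parts.append(current_part.strip())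
--             current_part = ""
--             i += 5
--         else:
--             current_part += author_field[i]
--             i += 1
--
--     if current_part.strip():
--         parts.append(current_part.strip())
--
--     return ", ".join(parts)
-- ===== SOURCE B (Python) =====
-- def _split_authors(author_field: str) -> str:
--     if not author_field:
--         return ""
--     low = author_field.lower()
--     parts = []
--     start = 0
--     while True:
--         off = low[start:].find(' and ')
--         if off == -1:
--             parts.append(author_field[start:].strip())
--             break
--         parts.append(author_field[start:start + off].strip())
--         start += off + 5
--     return ", ".join(p for p in parts if p)
-- ===== Notes on version B (the rewrite author's own statement) =====
-- stated objective: faster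
-- what changed: A builds each author with a character-by-character scan that lowercases a fresh 5-char slice at every position and grows current_part by string concatenation; B lowercases the string once, jumps between separators with str.find on the lowered suffix, and slices whole segments out of the original string, filtering empty parts at the join.
import Mathlib
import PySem

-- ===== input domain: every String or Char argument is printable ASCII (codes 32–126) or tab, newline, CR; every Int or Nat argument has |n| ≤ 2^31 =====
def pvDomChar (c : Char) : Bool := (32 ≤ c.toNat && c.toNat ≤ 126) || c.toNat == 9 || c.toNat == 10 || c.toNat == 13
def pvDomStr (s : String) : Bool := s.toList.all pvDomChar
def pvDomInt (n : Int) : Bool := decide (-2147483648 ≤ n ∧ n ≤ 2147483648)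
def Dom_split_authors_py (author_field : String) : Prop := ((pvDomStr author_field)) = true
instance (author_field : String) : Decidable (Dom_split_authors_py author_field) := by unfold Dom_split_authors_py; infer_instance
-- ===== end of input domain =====

-- B replaces A's character-by-character accumulating scan with find-based jumps on a
-- lowercased copy, slicing whole segments out of the original string (objective: faster; measured).

-- ===== PORT A =====
def pvPat : List Char := [' ', 'a', 'n', 'd', ' ']

-- A's while loop: index i, accumulated current part, collected parts.
def pvAloop (cs : List Char) (i : Nat) (current : List Char) (parts : List (List Char)) :
    List (List Char) :=
  if h : i < cs.length then
    if i + 5 ≤ cs.length ∧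
        PySem.Chars.lower (PySem.List.slice cs (some (i : Int)) (some ((i : Int) + 5))) = pvPat then
      pvAloop cs (i + 5) []
        (if PySem.Chars.strip current ≠ [] then parts ++ [PySem.Chars.strip current] else parts)
    else
      pvAloop cs (i + 1) (current ++ [cs[i]'h]) parts
  else
    if PySem.Chars.strip current ≠ [] then parts ++ [PySem.Chars.strip current] else parts
termination_by cs.length - i

def split_authors_py (author_field : String) : String :=
  if author_field.toList = [] then ""
  else String.ofList (PySem.Chars.join (", ".toList) (pvAloop author_field.toList 0 [] []))

-- ===== PORT B =====
-- termination helper for B's loop, cited in decreasing_by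
theorem pvFind_bound (low : List Char) (start : Nat)
    (h : PySem.Chars.find (low.drop start) pvPat ≠ -1) :
    start + (PySem.Chars.find (low.drop start) pvPat).toNat + 5 ≤ low.length := by
  have hs := PySem.Chars.findFrom_natCast_spec (low.drop start) pvPat 0 (Nat.zero_le _)
  rw [Nat.cast_zero, PySem.Chars.findFrom_zero] at hs
  obtain ⟨-, hpre, -⟩ := hs h
  have hlen := hpre.length_le
  rw [List.drop_drop, List.length_drop] at hlen
  have h5 : pvPat.length = 5 := rfl
  rw [h5] at hlen
  omega

-- B's while loop: start index, find on the lowered suffix, slice segments out of cs.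
def pvBloop (cs low : List Char) (start : Nat) (parts : List (List Char)) : List (List Char) :=
  if h : PySem.Chars.find (low.drop start) pvPat = -1 then
    parts ++ [PySem.Chars.strip (PySem.List.slice cs (some (start : Int)) none)]
  else
    pvBloop cs low (start + (PySem.Chars.find (low.drop start) pvPat).toNat + 5)
      (parts ++ [PySem.Chars.strip (PySem.List.slice cs (some (start : Int))
        (some ((start : Int) + PySem.Chars.find (low.drop start) pvPat)))])
termination_by low.length + 1 - start
decreasing_by
  have := pvFind_bound low start h
  omega

def split_authors_py_alt (author_field : String) : String :=
  if author_field.toList = [] then ""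
  else
    String.ofList (PySem.Chars.join (", ".toList)
      ((pvBloop author_field.toList (PySem.Chars.lower author_field.toList) 0 []).filter
        (fun p => p ≠ [])))

-- ===== PRECONDITION & SPEC =====
def Spec_split_authors_py (author_field : String) (out : String) : Prop := out = split_authors_py_alt author_field
instance (author_field : String) (out : String) : Decidable (Spec_split_authors_py author_field out) := by unfold Spec_split_authors_py; infer_instance

-- ===== CLAIM (what is proved, stated in full; the proofs are below) =====
def Claim_equal_split_authors_py : Prop := ∀ (author_field : String), Dom_split_authors_py author_field → Spec_split_authors_py author_field (split_authors_py author_field)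

-- ===== LEMMAS AND PROOFS =====

-- A's separator test at position i is exactly "pvPat is a prefix of the lowered string dropped at i".
theorem pvMatch_iff (cs : List Char) (i : Nat) :
    (i + 5 ≤ cs.length ∧
      PySem.Chars.lower (PySem.List.slice cs (some (i : Int)) (some ((i : Int) + 5))) = pvPat)
    ↔ pvPat <+: (PySem.Chars.lower cs).drop i := by
  have h5 : ((i : Int) + 5) = ((i : Int) + ((5 : Nat) : Int)) := by norm_num
  rw [h5, PySem.List.slice_natCast_add]
  constructor
  · rintro ⟨hle, heq⟩
    rw [List.prefix_iff_eq_take]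
    have : PySem.Chars.lower cs = cs.map PySem.Chars.lowerChar := rfl
    rw [this, ← List.map_drop, ← List.map_take]
    simpa [pvPat, PySem.Chars.lower] using heq.symm
  · intro hp
    have hlen := hp.length_le
    simp [pvPat] at hlen
    have hl : PySem.Chars.lower cs = cs.map PySem.Chars.lowerChar := rfl
    rw [hl, List.length_map] at hlen
    refine ⟨by omega, ?_⟩
    rw [List.prefix_iff_eq_take] at hp
    have : pvPat.length = 5 := rfl
    rw [this] at hp
    rw [hl, ← List.map_drop, ← List.map_take] at hp
    simpa [PySem.Chars.lower] using hp.symm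

-- no separator matches in [i, i+d): A's scan just moves d characters into current
theorem pvAloop_scan (cs : List Char) (d : Nat) :
    ∀ (i : Nat) (current : List Char) (parts : List (List Char)),
      i + d ≤ cs.length →
      (∀ k, i ≤ k → k < i + d → ¬ pvPat <+: (PySem.Chars.lower cs).drop k) →
      pvAloop cs i current parts = pvAloop cs (i + d) (current ++ (cs.drop i).take d) parts := by
  induction d with
  | zero => intro i current parts _ _; simp
  | succ d ih =>
    intro i current parts hle hno
    have hi : i < cs.length := by omega
    have hcond : ¬ (i + 5 ≤ cs.length ∧
        PySem.Chars.lower (PySem.List.slice cs (some (i : Int)) (some ((i : Int) + 5))) = pvPat) := by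
      rw [pvMatch_iff]
      exact hno i le_rfl (by omega)
    rw [pvAloop, dif_pos hi, if_neg hcond]
    rw [ih (i + 1) (current ++ [cs[i]'hi]) parts (by omega)
      (fun k hk1 hk2 => hno k (by omega) (by omega))]
    congr 1
    · omega
    · rw [List.append_assoc]
      congr 1
      have : cs.drop i = cs[i]'hi :: cs.drop (i + 1) := List.drop_eq_getElem_cons hi
      rw [this, List.take_succ_cons, List.singleton_append]

-- no separator matches from i on: A's loop terminates with current ++ cs.drop i as the last part
theorem pvAloop_tail (cs : List Char) (i : Nat) (current : List Char) (parts : List (List Char))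
    (hno : ∀ k, i ≤ k → ¬ pvPat <+: (PySem.Chars.lower cs).drop k) :
    pvAloop cs i current parts =
      (if PySem.Chars.strip (current ++ cs.drop i) ≠ [] then
        parts ++ [PySem.Chars.strip (current ++ cs.drop i)] else parts) := by
  by_cases hi : i ≤ cs.length
  · rw [pvAloop_scan cs (cs.length - i) i current parts (by omega)
      (fun k hk _ => hno k hk)]
    rw [pvAloop]
    have hni : ¬ (i + (cs.length - i) < cs.length) := by omega
    have ht : (cs.drop i).take (cs.length - i) = cs.drop i :=
      List.take_of_length_le (by simp)
    rw [ht, dif_neg hni]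
  · rw [pvAloop]
    have hni : ¬ (i < cs.length) := by omega
    rw [dif_neg hni]
    have : cs.drop i = [] := List.drop_of_length_le (by omega)
    simp [this]

-- infix transfer: a prefix match at k ≥ i is an infix of the drop at i
theorem pvInfix_of_prefix_drop (low : List Char) (i k : Nat) (hik : i ≤ k)
    (h : pvPat <+: low.drop k) : pvPat <:+: low.drop i := by
  have : low.drop k = (low.drop i).drop (k - i) := by rw [List.drop_drop]; congr 1; omega
  rw [this] at h
  exact h.isInfix.trans (List.drop_suffix _ _).isInfix

-- filter distributes over appending one segment
theorem pvFilter_snoc (parts : List (List Char)) (seg : List Char) :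
    (parts ++ [seg]).filter (fun p => p ≠ []) =
      (parts.filter (fun p => p ≠ [])) ++ (if seg ≠ [] then [seg] else []) := by
  rw [List.filter_append]
  congr 1
  by_cases h : seg = [] <;> simp [h]

-- main loop correspondence: A collects only nonempty stripped parts, B filters at the end
theorem pvMain (cs : List Char) : ∀ (fuel i : Nat), cs.length + 1 - i ≤ fuel → i ≤ cs.length →
    ∀ (parts : List (List Char)),
      pvAloop cs i [] (parts.filter (fun p => p ≠ [])) =
        (pvBloop cs (PySem.Chars.lower cs) i parts).filter (fun p => p ≠ []) := by
  intro fuel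
  induction fuel with
  | zero => intro i hf hi parts; omega
  | succ fuel ih =>
    intro i hf hi parts
    have hlen : (PySem.Chars.lower cs).length = cs.length := by
      have : PySem.Chars.lower cs = cs.map PySem.Chars.lowerChar := rfl
      simp [this]
    by_cases hoff : PySem.Chars.find ((PySem.Chars.lower cs).drop i) pvPat = -1
    · -- no further separator: both finish with the last segment
      have hno : ∀ k, i ≤ k → ¬ pvPat <+: (PySem.Chars.lower cs).drop k := by
        intro k hk hp
        exact (PySem.Chars.find_eq_neg_one_iff _ _).mp hoff
          (pvInfix_of_prefix_drop (PySem.Chars.lower cs) i k hk hp)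
      rw [pvBloop, dif_pos hoff, pvAloop_tail cs i [] _ hno, pvFilter_snoc,
        PySem.List.slice_from_natCast]
      simp only [List.nil_append]
      by_cases hseg : PySem.Chars.strip (cs.drop i) = [] <;> simp [hseg]
    · -- separator found at i + off: A scans to it, both cut the same segment
      rw [pvBloop, dif_neg hoff]
      have hspec := PySem.Chars.findFrom_natCast_spec ((PySem.Chars.lower cs).drop i) pvPat 0
        (Nat.zero_le _)
      rw [Nat.cast_zero, PySem.Chars.findFrom_zero] at hspec
      obtain ⟨hoffnn, hpre, hmin⟩ := hspec hoff
      set off := PySem.Chars.find ((PySem.Chars.lower cs).drop i) pvPat with hoffdef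
      have hbnd : i + off.toNat + 5 ≤ cs.length := by
        have := pvFind_bound (PySem.Chars.lower cs) i hoff
        omega
      have hpre' : pvPat <+: (PySem.Chars.lower cs).drop (i + off.toNat) := by
        have h := hpre
        rwa [List.drop_drop] at h
      have hnomid : ∀ k, i ≤ k → k < i + off.toNat → ¬ pvPat <+: (PySem.Chars.lower cs).drop k := by
        intro k hk1 hk2 hp
        have : (PySem.Chars.lower cs).drop k = ((PySem.Chars.lower cs).drop i).drop (k - i) := by
          rw [List.drop_drop]; congr 1; omega
        rw [this] at hp
        exact hmin (k - i) (Nat.zero_le _) (by omega) hp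
      rw [pvAloop_scan cs off.toNat i [] _ (by omega) hnomid]
      have hcond : (i + off.toNat) + 5 ≤ cs.length ∧
          PySem.Chars.lower (PySem.List.slice cs (some ((i + off.toNat : Nat) : Int))
            (some (((i + off.toNat : Nat) : Int) + 5))) = pvPat := by
        rw [pvMatch_iff]
        exact hpre'
      rw [pvAloop, dif_pos (by omega : i + off.toNat < cs.length), if_pos hcond]
      have hsl : PySem.List.slice cs (some (i : Int)) (some ((i : Int) + off)) =
          (cs.drop i).take off.toNat := by
        have h0 : (0 : Int) ≤ off := by
          rcases (PySem.Chars.neg_one_le_find ((PySem.Chars.lower cs).drop i) pvPat).lt_or_eq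
            with h | h
          · rw [← hoffdef] at h; omega
          · exact absurd (hoffdef.trans h.symm) hoff
        have : (i : Int) + off = ((i : Int) + ((off.toNat : Nat) : Int)) := by
          simp [Int.toNat_of_nonneg h0]
        rw [this, PySem.List.slice_natCast_add]
      rw [hsl]
      rw [← ih (i + off.toNat + 5) (by omega) (by omega)
        (parts ++ [PySem.Chars.strip ((cs.drop i).take off.toNat)])]
      congr 1
      rw [pvFilter_snoc]
      simp only [List.nil_append]
      by_cases hseg : PySem.Chars.strip ((cs.drop i).take off.toNat) = [] <;> simp [hseg]

-- ===== VERDICT (by name: the statement is the Claim_ definition above) =====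
theorem split_authors_py_spec : Claim_equal_split_authors_py := by
  intro s _
  unfold Spec_split_authors_py split_authors_py split_authors_py_alt
  by_cases h : s.toList = []
  · simp [h]
  · rw [if_neg h, if_neg h]
    congr 1
    congr 1
    have := pvMain s.toList (s.toList.length + 1) 0 (by omega) (Nat.zero_le _) []
    simpa using this
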